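-- pv_equiv track=rewrite | github.com/djpapzin/malawi-rag-sql-chatbot | tests/test_education_count.py | parse_api_response
-- ===== SOURCE A (Python) =====
-- def parse_api_response(response_text):
--     """Parse the API response text into structured data"""
--     projects = []
--     current_project = {}
--
--     for line in response_text.split('\n'):
--         if not line.strip():
--             if current_project:
--                 projects.append(current_project)
--                 current_project = {}
--             continue
--
--         if ':' in line:
--             key, value = line.split(':', 1)
--             key = key.strip()
--             value = value.strip()
--
--             if key == 'Project':
--                 if current_project:
--                     projects.append(current_project)
--                 current_project = {}
--             current_project[key] = value
--
--     if current_project: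
--         projects.append(current_project)
--
--     return projects
-- ===== SOURCE B (Python) =====
-- def parse_api_response(response_text):
--     """Parse the API response text into structured data"""
--     # 1) group the lines into blocks of consecutive non-blank lines
--     blocks = []
--     block = []
--     for line in response_text.split('\n'):
--         if line.strip():
--             block.append(line)
--         else:
--             if block:
--                 blocks.append(block)
--             block = []
--     if block:
--         blocks.append(block)
--
--     projects = []
--     for blk in blocks:
--         # 2) split each block into sub-project segments at every 'Project' key line
--         segments = []
--         seg = []
--         for line in blk:
--             if ':' in line and line.split(':', 1)[0].strip() == 'Project':
--                 segments.append(seg)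
--                 seg = []
--             seg.append(line)
--         segments.append(seg)
--         # 3) build a dict per segment; keep the non-empty ones in order
--         for s in segments:
--             d = {}
--             for line in s:
--                 if ':' in line:
--                     key, value = line.split(':', 1)
--                     d[key.strip()] = value.strip()
--             if d:
--                 projects.append(d)
--     return projects
-- ===== Notes on version B (the rewrite author's own statement) =====
-- stated objective: alternative
-- what changed: A's single flat state machine (running dict flushed at blanks and 'Project' keys) is replaced by a two-level grouping: lines are first grouped into blank-separated blocks, each block is split into 'Project'-delimited segments, and one dict is built per segment, keeping the non-empty ones in order.
import Mathlib
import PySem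

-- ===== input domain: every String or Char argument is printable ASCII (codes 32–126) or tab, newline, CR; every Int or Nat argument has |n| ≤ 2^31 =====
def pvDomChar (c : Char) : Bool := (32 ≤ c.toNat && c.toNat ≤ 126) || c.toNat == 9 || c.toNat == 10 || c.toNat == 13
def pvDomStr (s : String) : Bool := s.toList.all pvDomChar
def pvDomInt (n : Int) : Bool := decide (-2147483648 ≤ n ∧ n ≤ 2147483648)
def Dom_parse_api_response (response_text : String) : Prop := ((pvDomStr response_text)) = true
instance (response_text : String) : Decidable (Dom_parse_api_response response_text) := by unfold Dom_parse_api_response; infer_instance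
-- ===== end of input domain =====

-- B replaces A's flat running-state machine by a two-level grouping (blank-separated blocks,
-- then Project-delimited segments, then one dict per segment); objective: alternative decomposition.

-- shared primitive helpers: line.strip() == '', ':' in line, line.split(':', 1) with both parts stripped
def pvBlank (line : String) : Bool := PySem.Str.strip line == ""

def pvHasColon (line : String) : Bool := PySem.Str.isIn ":" line

def pvKV (line : String) : String × String :=
  match PySem.Str.splitMax? line ":" 1 with
  | some (k :: v :: _) => (PySem.Str.strip k, PySem.Str.strip v)
  | _ => (PySem.Str.strip line, "")

-- ===== PORT A =====
def pvAStep (st : List (List (String × String)) × PySem.Dict String String) (line : String) :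
    List (List (String × String)) × PySem.Dict String String :=
  if pvBlank line then
    (if st.2.items = [] then st else (st.1 ++ [st.2.items], PySem.Dict.mk []))
  else if pvHasColon line then
    let kv := pvKV line
    if kv.1 = "Project" then
      ((if st.2.items = [] then st.1 else st.1 ++ [st.2.items]), (PySem.Dict.mk []).insert kv.1 kv.2)
    else
      (st.1, st.2.insert kv.1 kv.2)
  else st

def parse_api_response (response_text : String) : List (List (String × String)) :=
  let st := ((PySem.Str.split? response_text "\n").getD []).foldl pvAStep ([], PySem.Dict.mk [])
  if st.2.items = [] then st.1 else st.1 ++ [st.2.items]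

-- ===== PORT B =====
-- grouping loop: blank lines separate blocks of consecutive non-blank lines
def pvGStep (st : List (List String) × List String) (line : String) :
    List (List String) × List String :=
  if ¬ pvBlank line then (st.1, st.2 ++ [line])
  else if st.2 = [] then st else (st.1 ++ [st.2], [])

def pvBlocks (response_text : String) : List (List String) :=
  let st := ((PySem.Str.split? response_text "\n").getD []).foldl pvGStep ([], [])
  if st.2 = [] then st.1 else st.1 ++ [st.2]

-- segment loop: a new segment starts at every line whose stripped key is 'Project'
def pvSStep (st : List (List String) × List String) (line : String) :
    List (List String) × List String :=
  let st' := if pvHasColon line ∧ (pvKV line).1 = "Project" then (st.1 ++ [st.2], []) else st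
  (st'.1, st'.2 ++ [line])

def pvSegs (blk : List String) : List (List String) :=
  let st := blk.foldl pvSStep ([], [])
  st.1 ++ [st.2]

-- dict of one segment
def pvDictOf (seg : List String) : PySem.Dict String String :=
  seg.foldl (fun d line => if pvHasColon line then d.insert (pvKV line).1 (pvKV line).2 else d)
    (PySem.Dict.mk [])

-- keep a segment's dict only when non-empty
def pvEmitStep (acc : List (List (String × String))) (seg : List String) :
    List (List (String × String)) :=
  let d := pvDictOf seg
  if d.items = [] then acc else acc ++ [d.items]

def parse_api_response_alt (response_text : String) : List (List (String × String)) :=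
  (pvBlocks response_text).foldl (fun acc blk => (pvSegs blk).foldl pvEmitStep acc) []

-- ===== PRECONDITION & SPEC =====
def Spec_parse_api_response (response_text : String) (out : List (List (String × String))) : Prop := out = parse_api_response_alt response_text
instance (response_text : String) (out : List (List (String × String))) : Decidable (Spec_parse_api_response response_text out) := by unfold Spec_parse_api_response; infer_instance

-- ===== CLAIM (what is proved, stated in full; the proofs are below) =====
def Claim_equal_parse_api_response : Prop := ∀ (response_text : String), Dom_parse_api_response response_text → Spec_parse_api_response response_text (parse_api_response response_text)

-- ===== LEMMAS AND PROOFS =====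

def pvEmit (d : PySem.Dict String String) : List (List (String × String)) :=
  if d.items = [] then [] else [d.items]

def pvAFin (st : List (List (String × String)) × PySem.Dict String String) :
    List (List (String × String)) :=
  if st.2.items = [] then st.1 else st.1 ++ [st.2.items]

def pvGFin (st : List (List String) × List String) : List (List String) :=
  if st.2 = [] then st.1 else st.1 ++ [st.2]

-- mid-level recursive description shared by both proofs: current segment's raw lines, remaining lines
def pvM : List String → List String → List (List (String × String))
  | seg, [] => pvEmit (pvDictOf seg)
  | seg, l :: ls =>
    if pvBlank l then pvEmit (pvDictOf seg) ++ pvM [] ls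
    else if pvHasColon l ∧ (pvKV l).1 = "Project" then pvEmit (pvDictOf seg) ++ pvM [l] ls
    else pvM (seg ++ [l]) ls

-- recursive description of the grouping loop
def pvGRec : List String → List String → List (List String)
  | pending, [] => if pending = [] then [] else [pending]
  | pending, l :: ls =>
    if ¬ pvBlank l then pvGRec (pending ++ [l]) ls
    else if pending = [] then pvGRec [] ls else pending :: pvGRec [] ls

def pvPB (blk : List String) : List (List (String × String)) :=
  ((pvSegs blk).map pvDictOf).flatMap pvEmit

lemma pvDictOf_nil : pvDictOf [] = PySem.Dict.mk [] := rfl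

@[simp] lemma pvDictOf_nil_items : (pvDictOf []).items = [] := rfl

lemma pvDictOf_append (seg : List String) (l : String) :
    pvDictOf (seg ++ [l]) =
      if pvHasColon l then (pvDictOf seg).insert (pvKV l).1 (pvKV l).2 else pvDictOf seg := by
  simp [pvDictOf, List.foldl_append]

lemma pvA_loop (ls : List String) (acc : List (List (String × String))) (seg : List String) :
    pvAFin (ls.foldl pvAStep (acc, pvDictOf seg)) = acc ++ pvM seg ls := by
  induction ls generalizing acc seg with
  | nil =>
    by_cases h : (pvDictOf seg).items = [] <;> simp [pvAFin, pvM, pvEmit, h]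
  | cons l ls ih =>
    rw [List.foldl_cons]
    by_cases hb : pvBlank l = true
    · by_cases h : (pvDictOf seg).items = []
      · have hd : pvDictOf seg = pvDictOf [] := PySem.Dict.ext (by simp [pvDictOf_nil, h])
        have hstep : pvAStep (acc, pvDictOf seg) l = (acc, pvDictOf []) := by
          simp [pvAStep, hb, hd]
        rw [hstep, ih]
        simp [pvM, hb, pvEmit, h]
      · have hstep : pvAStep (acc, pvDictOf seg) l =
            (acc ++ [(pvDictOf seg).items], pvDictOf []) := by
          simp [pvAStep, hb, h, pvDictOf_nil]
        rw [hstep, ih]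
        simp [pvM, hb, pvEmit, h]
    · by_cases hc : pvHasColon l = true
      · by_cases hp : (pvKV l).1 = "Project"
        · have hstep : pvAStep (acc, pvDictOf seg) l =
              ((if (pvDictOf seg).items = [] then acc else acc ++ [(pvDictOf seg).items]),
                pvDictOf [l]) := by
            simp [pvAStep, pvDictOf, hb, hc, hp]
          rw [hstep, ih]
          by_cases h : (pvDictOf seg).items = [] <;> simp [pvM, hb, hc, hp, pvEmit, h]
        · have hstep : pvAStep (acc, pvDictOf seg) l = (acc, pvDictOf (seg ++ [l])) := by
            simp [pvAStep, hb, hc, hp, pvDictOf_append]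
          rw [hstep, ih]
          simp [pvM, hb, hc, hp]
      · have hstep : pvAStep (acc, pvDictOf seg) l = (acc, pvDictOf (seg ++ [l])) := by
          simp [pvAStep, hb, hc, pvDictOf_append]
        rw [hstep, ih]
        simp [pvM, hb, hc]

lemma pvG_loop (ls : List String) (blocks : List (List String)) (block : List String) :
    pvGFin (ls.foldl pvGStep (blocks, block)) = blocks ++ pvGRec block ls := by
  induction ls generalizing blocks block with
  | nil => by_cases h : block = [] <;> simp [pvGFin, pvGRec, h]
  | cons l ls ih =>
    rw [List.foldl_cons]
    by_cases hb : pvBlank l = true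
    · by_cases h : block = []
      · have hstep : pvGStep (blocks, block) l = (blocks, []) := by simp [pvGStep, hb, h]
        rw [hstep, ih]; simp [pvGRec, hb, h]
      · have hstep : pvGStep (blocks, block) l = (blocks ++ [block], []) := by
          simp [pvGStep, hb, h]
        rw [hstep, ih]; simp [pvGRec, hb, h]
    · have hstep : pvGStep (blocks, block) l = (blocks, block ++ [l]) := by
        simp [pvGStep, hb]
      rw [hstep, ih]; simp [pvGRec, hb]

lemma pvEmit_fold (segs : List (List String)) (acc : List (List (String × String))) :
    segs.foldl pvEmitStep acc = acc ++ (segs.map pvDictOf).flatMap pvEmit := by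
  induction segs generalizing acc with
  | nil => simp
  | cons s segs ih =>
    by_cases h : (pvDictOf s).items = [] <;> simp [pvEmitStep, h, ih, pvEmit]

lemma pvOuter_fold (blocks : List (List String)) (acc : List (List (String × String))) :
    blocks.foldl (fun acc blk => (pvSegs blk).foldl pvEmitStep acc) acc =
      acc ++ blocks.flatMap pvPB := by
  induction blocks generalizing acc with
  | nil => simp
  | cons b bs ih =>
    rw [List.foldl_cons, pvEmit_fold, ih]
    simp [pvPB, List.append_assoc]

lemma pvPB_state (pending : List String) :
    pvPB pending =
      ((pending.foldl pvSStep ([], [])).1.map pvDictOf).flatMap pvEmit ++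
        pvEmit (pvDictOf (pending.foldl pvSStep ([], [])).2) := by
  simp [pvPB, pvSegs]

lemma pvZ (ls pending : List String) :
    (pvGRec pending ls).flatMap pvPB =
      ((pending.foldl pvSStep ([], [])).1.map pvDictOf).flatMap pvEmit ++
        pvM (pending.foldl pvSStep ([], [])).2 ls := by
  induction ls generalizing pending with
  | nil =>
    by_cases h : pending = []
    · subst h; simp [pvGRec, pvM, pvEmit]
    · simp only [pvGRec, h, if_false, List.flatMap_cons, List.flatMap_nil, List.append_nil]
      rw [pvPB_state]
      simp [pvM]
  | cons l ls ih =>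
    by_cases hb : pvBlank l = true
    · by_cases h : pending = []
      · subst h
        simp only [pvGRec, hb, not_true, if_false, if_true]
        rw [ih []]
        simp [pvM, hb, pvEmit]
      · simp only [pvGRec, hb, not_true, if_false, h]
        rw [List.flatMap_cons, ih [], pvPB_state]
        simp [pvM, hb]
    · simp only [pvGRec, hb, if_true, Bool.not_eq_true]
      rw [ih (pending ++ [l]), List.foldl_append]
      by_cases hp : pvHasColon l ∧ (pvKV l).1 = "Project"
      · simp [pvSStep, hp, pvM, hb]
      · simp [pvSStep, hp, pvM, hb]

-- ===== VERDICT (by name: the statement is the Claim_ definition above) =====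
theorem parse_api_response_spec : Claim_equal_parse_api_response := by
  intro response_text _
  unfold Spec_parse_api_response parse_api_response parse_api_response_alt pvBlocks
  show pvAFin (((PySem.Str.split? response_text "\n").getD []).foldl pvAStep ([], pvDictOf [])) =
    (pvGFin (((PySem.Str.split? response_text "\n").getD []).foldl pvGStep ([], []))).foldl
      (fun acc blk => (pvSegs blk).foldl pvEmitStep acc) []
  rw [pvA_loop, pvG_loop, pvOuter_fold]
  simp only [List.nil_append]
  rw [pvZ]
  simp
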